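-- pv_equiv track=rewrite | github.com/duochen13/Algo | Others/onlineAssessment/rh/playground.py | playground1
-- ===== SOURCE A (Python) =====
-- import collections
--
-- def playground1(nums):
--     """
--     Find odd number of zero digits
--     :param nums: list of int
--     :return: int
--     """
--
--     res = 0
--     for num in nums:
--         num = str(num)
--         zeros = collections.Counter(num)['0']
--         if zeros % 2:
--             res += 1
--     return res
-- ===== SOURCE B (Python) =====
-- def playground1(nums):
--     res = 0
--     for num in nums:
--         if num == 0:
--             z = 1
--         else:
--             n = abs(num)
--             z = 0
--             while n:
--                 if n % 10 == 0:
--                     z += 1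
--                 n //= 10
--         if z % 2 == 1:
--             res += 1
--     return res
-- ===== Notes on version B (the rewrite author's own statement) =====
-- stated objective: faster
-- what changed: Counts each number's zero digits by arithmetic extraction (abs, %10, //10, with 0 treated as one zero digit) instead of converting to a string and building a collections.Counter over all its characters.
import Mathlib
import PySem

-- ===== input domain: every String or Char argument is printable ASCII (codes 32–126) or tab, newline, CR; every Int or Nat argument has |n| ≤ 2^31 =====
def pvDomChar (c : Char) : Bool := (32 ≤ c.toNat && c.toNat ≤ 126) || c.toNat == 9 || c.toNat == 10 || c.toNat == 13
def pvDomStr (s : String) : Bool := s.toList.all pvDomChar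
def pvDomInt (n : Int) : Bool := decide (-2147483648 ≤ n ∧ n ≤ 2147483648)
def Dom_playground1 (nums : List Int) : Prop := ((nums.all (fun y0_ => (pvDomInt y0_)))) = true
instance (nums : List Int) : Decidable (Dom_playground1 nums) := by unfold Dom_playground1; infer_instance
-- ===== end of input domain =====

-- B counts zero digits by numeric extraction (abs + %10 / //10, with 0 having one zero digit)
-- instead of A's str()+Counter scan; objective: a measurably faster constant (no str/Counter allocation), same value.

-- ===== PORT A =====
-- res = 0; for num in nums: zeros = Counter(str(num))['0']; if zeros % 2: res += 1
def playground1 (nums : List Int) : Int :=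
  nums.foldl (fun res num =>
    let s := PySem.Int.toStr num
    let zeros : Int := (PySem.Dict.counter s.toList).getD '0' 0
    if PySem.Int.mod zeros 2 ≠ 0 then res + 1 else res) 0

-- ===== PORT B =====
-- while n: if n % 10 == 0: z += 1; n //= 10   (accumulator z, over n = abs(num))
def pvBZeros (n z : Nat) : Nat :=
  if n = 0 then z else pvBZeros (n / 10) (z + if n % 10 = 0 then 1 else 0)
  termination_by n
  decreasing_by exact Nat.div_lt_self (Nat.pos_of_ne_zero (by assumption)) (by norm_num)

def playground1_alt (nums : List Int) : Int :=
  nums.foldl (fun res num =>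
    let z : Nat := if num = 0 then 1 else pvBZeros num.natAbs 0
    if z % 2 = 1 then res + 1 else res) 0

-- ===== PRECONDITION & SPEC =====
def Spec_playground1 (nums : List Int) (out : Int) : Prop := out = playground1_alt nums
instance (nums : List Int) (out : Int) : Decidable (Spec_playground1 nums out) := by unfold Spec_playground1; infer_instance

-- ===== CLAIM (what is proved, stated in full; the proofs are below) =====
def Claim_equal_playground1 : Prop := ∀ (nums : List Int), Dom_playground1 nums → Spec_playground1 nums (playground1 nums)

-- ===== LEMMAS AND PROOFS =====

-- non-accumulator form of B's inner loop, for the proofs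
def pvZC (n : Nat) : Nat :=
  if n = 0 then 0 else (if n % 10 = 0 then 1 else 0) + pvZC (n / 10)
  termination_by n
  decreasing_by exact Nat.div_lt_self (Nat.pos_of_ne_zero (by assumption)) (by norm_num)

theorem pvBZeros_eq (n : Nat) : ∀ z, pvBZeros n z = z + pvZC n := by
  induction n using Nat.strong_induction_on with
  | _ n ih =>
    intro z
    rw [pvBZeros, pvZC]
    by_cases h : n = 0
    · simp [h]
    · rw [if_neg h, if_neg h,
        ih (n / 10) (Nat.div_lt_self (Nat.pos_of_ne_zero h) (by norm_num))]
      omega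

-- '0'-count of the digit string produced by Nat.toDigitsCore, with enough fuel
theorem toDigitsCore_count_zero :
    ∀ (f n : Nat) (acc : List Char), n < f →
      (Nat.toDigitsCore 10 f n acc).count '0' =
        (if n % 10 = 0 then 1 else 0) + pvZC (n / 10) + acc.count '0' := by
  intro f
  induction f with
  | zero => intro n acc h; omega
  | succ f ih =>
    intro n acc _
    rw [Nat.toDigitsCore]
    have hz0 : pvZC 0 = 0 := by rw [pvZC]; simp
    have hd : ((n % 10).digitChar = '0') ↔ n % 10 = 0 := by
      have : n % 10 < 10 := Nat.mod_lt _ (by norm_num)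
      interval_cases (n % 10) <;> simp [Nat.digitChar]
    by_cases h10 : n / 10 = 0
    · rw [if_pos h10, h10, hz0]
      by_cases hz : n % 10 = 0
      · rw [hd.mpr hz, List.count_cons_self, if_pos hz]; omega
      · rw [List.count_cons_of_ne (fun h => hz (hd.mp h)), if_neg hz]; omega
    · rw [if_neg h10]
      have hn : 0 < n := by
        rcases Nat.eq_zero_or_pos n with h | h
        · exfalso; exact h10 (by simp [h])
        · exact h
      have hlt : n / 10 < f := by
        have := Nat.div_lt_self hn (by norm_num : 1 < 10)
        omega
      rw [ih (n / 10) _ hlt]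
      conv_rhs => rw [pvZC, if_neg h10]
      by_cases hz : n % 10 = 0
      · rw [hd.mpr hz, List.count_cons_self, if_pos hz]; omega
      · rw [List.count_cons_of_ne (fun h => hz (hd.mp h)), if_neg hz]; omega

theorem toDigits_count_zero (m : Nat) :
    (Nat.toDigits 10 m).count '0' = if m = 0 then 1 else pvZC m := by
  rw [Nat.toDigits, toDigitsCore_count_zero (m + 1) m [] (by omega)]
  by_cases h : m = 0
  · simp [h, pvZC]
  · rw [if_neg h]
    conv_rhs => rw [pvZC, if_neg h]
    simp

-- '0'-count of str(num) equals B's zero count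
theorem count_toChars (num : Int) :
    (PySem.Int.toChars num).count '0' = if num = 0 then 1 else pvZC num.natAbs := by
  rw [PySem.Int.toChars]
  by_cases h : num < 0
  · rw [if_pos h, List.count_cons_of_ne (by decide), toDigits_count_zero]
    have h0 : num ≠ 0 := by omega
    have hn : num.natAbs ≠ 0 := by omega
    simp [hn, h0]
  · rw [if_neg h]
    have hna : num.toNat = num.natAbs := by omega
    rw [hna, toDigits_count_zero]
    have hiff : num.natAbs = 0 ↔ num = 0 := by omega
    simp [hiff]

-- ===== VERDICT (by name: the statement is the Claim_ definition above) =====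
theorem playground1_spec : Claim_equal_playground1 := by
  intro nums _
  unfold Spec_playground1 playground1 playground1_alt
  apply PySem.List.foldl_congr_mem
  intro res num _
  simp only []
  have hz : (PySem.Dict.counter (PySem.Int.toStr num).toList).getD '0' 0
      = ((if num = 0 then 1 else pvZC num.natAbs : Nat) : Int) := by
    rw [PySem.Dict.getD_counter, PySem.Int.toList_toStr, count_toChars]
  rw [hz]
  set z : Nat := if num = 0 then 1 else pvZC num.natAbs with hzdef
  have hb : (if num = 0 then 1 else pvBZeros num.natAbs 0) = z := by
    rw [hzdef, pvBZeros_eq]; simp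
  rw [hb]
  have hm : PySem.Int.mod (z : Int) 2 = ((z % 2 : Nat) : Int) := by
    exact_mod_cast PySem.Int.mod_natCast z 2
  rw [hm]
  by_cases hp : z % 2 = 1
  · simp [hp]
  · have : z % 2 = 0 := by omega
    simp [this]
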